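-- pv_equiv track=rewrite | github.com/ckitagawa/Algorithms-And-DataStructures | python_algorithms_data_structures/CliqueCuts.py | solve
-- ===== SOURCE A (Python) =====
-- import itertools as it
--
-- def solve(n, a, b, c):
-- 	d = set(zip(zip(a, b), c))
-- 	S = 0
-- 	meaningful_set = set(a + b)
-- 	combs = []
-- 	for i in range(1, len(meaningful_set) + 1):
-- 		combs += it.combinations(meaningful_set, i)
-- 	for comb in combs:
-- 		alice = set([edge if (set(edge[0]).issubset(set(comb))) else None for edge in list(d)])
-- 		alice.discard(None)
-- 		unused = d.difference(alice)
-- 		bob = set([None if (edge[0][0] in comb or edge[0][1] in comb or edge[0] in comb) else edge for edge in list(unused)])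
-- 		bob.discard(None)
-- 		if (alice == set()) and (bob == set()):
-- 			S += 0
-- 		elif alice == set():
-- 			S -= sum(x[1] for x in list(bob))
-- 		elif bob == set():
-- 			S += sum(x[1] for x in list(alice))
-- 		else:
-- 			S += sum(x[1] for x in list(alice)) - sum(x[1] for x in list(bob))
-- 	return S % 1000000007
-- ===== SOURCE B (Python) =====
-- def solve(n, a, b, c):
--     # Over all nonempty vertex subsets, each distinct edge's
--     # "both endpoints in" and "neither endpoint in" counts differ by exactly 1,
--     # so the grand total is just the sum of distinct edge weights.
--     return sum(w for (_, w) in set(zip(zip(a, b), c))) % 1000000007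
-- ===== Notes on version B (the rewrite author's own statement) =====
-- stated objective: simpler
-- what changed: Replaces the enumeration of all 2^V-1 vertex subsets (and per-subset edge partitioning) by a closed form: every distinct edge nets exactly one copy of its weight over all nonempty subsets, so the answer is the sum of distinct edge weights mod 1000000007.
import Mathlib
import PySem

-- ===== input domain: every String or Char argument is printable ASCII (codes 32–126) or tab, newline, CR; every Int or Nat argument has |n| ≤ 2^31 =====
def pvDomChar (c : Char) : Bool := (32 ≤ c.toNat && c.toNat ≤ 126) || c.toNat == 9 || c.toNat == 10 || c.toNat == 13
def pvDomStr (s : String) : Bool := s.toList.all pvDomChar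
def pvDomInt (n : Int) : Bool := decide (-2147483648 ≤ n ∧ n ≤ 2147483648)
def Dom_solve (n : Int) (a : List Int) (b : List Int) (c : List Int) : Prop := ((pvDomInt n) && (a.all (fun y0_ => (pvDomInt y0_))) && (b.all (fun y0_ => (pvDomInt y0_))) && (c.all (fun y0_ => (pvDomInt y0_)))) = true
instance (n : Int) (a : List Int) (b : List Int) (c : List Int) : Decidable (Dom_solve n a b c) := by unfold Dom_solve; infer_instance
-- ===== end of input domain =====

-- B replaces A's enumeration of every nonempty vertex subset by a closed form
-- (each distinct edge nets exactly one copy of its weight over all nonempty subsets): objective = simpler.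

-- ===== PORT A =====

-- itertools.combinations(l, k): all k-element sublists, those containing l's head first
def combos (k : Nat) (l : List Int) : List (List Int) :=
  match k, l with
  | 0, _ => [[]]
  | _ + 1, [] => []
  | k + 1, x :: xs => ((combos k xs).map (x :: ·)) ++ combos (k + 1) xs

-- sum(x[1] for x in list(s))
def edgeSum (xs : List ((Int × Int) × Int)) : Int := xs.foldl (fun s e => s + e.2) 0

def combBody (d : PySem.Set ((Int × Int) × Int)) (S : Int) (comb : List Int) : Int :=
  -- the comprehension inserts None for non-alice edges and discards it: a filter here
  let alice : PySem.Set ((Int × Int) × Int) :=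
    PySem.Set.ofList (d.filter (fun e => decide (e.1.1 ∈ comb) && decide (e.1.2 ∈ comb)))
  let unused : PySem.Set ((Int × Int) × Int) := PySem.Set.diff d alice
  -- 'edge[0] in comb' compares an int pair with int members: always False in Python, untypable here, dropped
  let bob : PySem.Set ((Int × Int) × Int) :=
    PySem.Set.ofList (unused.filter (fun e => !(decide (e.1.1 ∈ comb) || decide (e.1.2 ∈ comb))))
  if PySem.Set.equal alice PySem.Set.empty && PySem.Set.equal bob PySem.Set.empty then S + 0
  else if PySem.Set.equal alice PySem.Set.empty then S - edgeSum bob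
  else if PySem.Set.equal bob PySem.Set.empty then S + edgeSum alice
  else S + (edgeSum alice - edgeSum bob)

def solve (n : Int) (a : List Int) (b : List Int) (c : List Int) : Int :=
  let d : PySem.Set ((Int × Int) × Int) := PySem.Set.ofList ((a.zip b).zip c)
  let ms : PySem.Set Int := PySem.Set.ofList (a ++ b)
  -- for i in range(1, len(meaningful_set)+1): combs += it.combinations(meaningful_set, i)
  let combs : List (List Int) :=
    (List.range ms.length).foldl (fun acc i => acc ++ combos (i + 1) ms) []
  let S : Int := combs.foldl (combBody d) 0
  PySem.Int.mod S 1000000007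

-- ===== PORT B =====
def solve_alt (n : Int) (a : List Int) (b : List Int) (c : List Int) : Int :=
  PySem.Int.mod
    ((PySem.Set.ofList ((a.zip b).zip c)).foldl (fun s e => s + e.2) 0) 1000000007

-- ===== PRECONDITION & SPEC =====
def Spec_solve (n : Int) (a : List Int) (b : List Int) (c : List Int) (out : Int) : Prop := out = solve_alt n a b c
instance (n : Int) (a : List Int) (b : List Int) (c : List Int) (out : Int) : Decidable (Spec_solve n a b c out) := by unfold Spec_solve; infer_instance

-- ===== CLAIM (what is proved, stated in full; the proofs are below) =====
def Claim_equal_solve : Prop := ∀ (n : Int) (a : List Int) (b : List Int) (c : List Int), Dom_solve n a b c → Spec_solve n a b c (solve n a b c)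

-- ===== LEMMAS AND PROOFS =====

-- the per-subset contribution of one edge: +w if both ends chosen, -w if neither
def gterm (e : (Int × Int) × Int) (s : List Int) : Int :=
  (if e.1.1 ∈ s ∧ e.1.2 ∈ s then e.2 else 0) - (if e.1.1 ∉ s ∧ e.1.2 ∉ s then e.2 else 0)

theorem foldl_add_eq_sum {α : Type} (f : α → Int) :
    ∀ (l : List α) (s : Int),
      l.foldl (fun s e => s + f e) s = s + (l.map f).sum := by
  intro l
  induction l with
  | nil => simp
  | cons x xs ih => intro s; simp [List.foldl_cons, ih, add_assoc]

theorem sum_map_add {α : Type} (f g : α → Int) (l : List α) :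
    (l.map f).sum + (l.map g).sum = (l.map (fun x => f x + g x)).sum := by
  induction l with
  | nil => simp
  | cons x xs ih => simp only [List.map_cons, List.sum_cons, ← ih]; ring

theorem sum_map_sub {α : Type} (f g : α → Int) (l : List α) :
    (l.map f).sum - (l.map g).sum = (l.map (fun x => f x - g x)).sum := by
  induction l with
  | nil => simp
  | cons x xs ih => simp only [List.map_cons, List.sum_cons, ← ih]; ring

theorem sum_filter_eq_sum_ite {α : Type} (p : α → Bool) (f : α → Int) (l : List α) :
    ((l.filter p).map f).sum = (l.map (fun x => if p x then f x else 0)).sum := by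
  induction l with
  | nil => simp
  | cons x xs ih =>
    by_cases h : p x <;> simp [h, ih]

theorem sum_comm {α β : Type} (l1 : List α) (l2 : List β) (f : α → β → Int) :
    (l1.map (fun x => (l2.map (f x)).sum)).sum
      = (l2.map (fun y => (l1.map (fun x => f x y)).sum)).sum := by
  induction l1 with
  | nil => simp
  | cons x xs ih => simp only [List.map_cons, List.sum_cons, ← sum_map_add, ih]

theorem foldl_append_eq_flatMap' {α β : Type} (f : α → List β) :
    ∀ (l : List α) (acc : List β), l.foldl (fun a i => a ++ f i) acc = acc ++ l.flatMap f := by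
  intro l
  induction l with
  | nil => simp
  | cons x xs ih => intro acc; simp [List.foldl_cons, ih]

theorem combos_perm (k : Nat) (l : List Int) : (combos k l).Perm (List.sublistsLen k l) := by
  induction l generalizing k with
  | nil =>
    match k with
    | 0 => simp [combos]
    | k + 1 => simp [combos]
  | cons x xs ih =>
    match k with
    | 0 => simp [combos]
    | k + 1 =>
      rw [combos, List.sublistsLen_succ_cons]
      exact (List.perm_append_comm).trans ((ih (k + 1)).append ((ih k).map _))

-- one chosen vertex: over all sublists, 'chosen' and 'not chosen' cancel
theorem count_one (v w : Int) (l : List Int) (hv : v ∈ l) (hn : l.Nodup) :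
    ((l.sublists').map (fun s => (if v ∈ s then w else 0) - (if v ∉ s then w else 0))).sum = 0 := by
  induction l with
  | nil => cases hv
  | cons x xs ih =>
    rw [List.sublists'_cons, List.map_append, List.sum_append, List.map_map]
    rcases List.nodup_cons.mp hn with ⟨hx, hxs⟩
    by_cases hvx : v = x
    · have h1 : (xs.sublists').map (fun s => (if v ∈ s then w else 0) - (if v ∉ s then w else 0))
          = (xs.sublists').map (fun _ => -w) := by
        apply List.map_congr_left
        intro s hs
        have : v ∉ s := fun hvs => hx (hvx ▸ (List.mem_sublists'.mp hs).subset hvs)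
        simp [this]
      have h2 : (xs.sublists').map ((fun s => (if v ∈ s then w else 0) - (if v ∉ s then w else 0)) ∘ (x :: ·))
          = (xs.sublists').map (fun _ => w) := by
        apply List.map_congr_left
        intro s _
        simp [List.mem_cons, hvx]
      rw [h1, h2]
      simp [List.map_const', List.sum_replicate]
    · have hvxs : v ∈ xs := (List.mem_cons.mp hv).resolve_left hvx
      have h2 : (xs.sublists').map ((fun s => (if v ∈ s then w else 0) - (if v ∉ s then w else 0)) ∘ (x :: ·))
          = (xs.sublists').map (fun s => (if v ∈ s then w else 0) - (if v ∉ s then w else 0)) := by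
        apply List.map_congr_left
        intro s _
        simp [List.mem_cons, hvx]
      rw [h2, ih hvxs hxs]
      simp

-- two chosen vertices: 'both chosen' and 'neither chosen' cancel over all sublists
theorem count_two (u v wt : Int) (l : List Int) (hu : u ∈ l) (hv : v ∈ l) (hn : l.Nodup) :
    ((l.sublists').map (fun s => (if u ∈ s ∧ v ∈ s then wt else 0) - (if u ∉ s ∧ v ∉ s then wt else 0))).sum = 0 := by
  induction l with
  | nil => cases hu
  | cons x xs ih =>
    rw [List.sublists'_cons, List.map_append, List.sum_append, List.map_map]
    rcases List.nodup_cons.mp hn with ⟨hx, hxs⟩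
    by_cases hux : u = x <;> by_cases hvx : v = x
    · -- u = v = x : a self-loop at the head
      have h1 : (xs.sublists').map (fun s => (if u ∈ s ∧ v ∈ s then wt else 0) - (if u ∉ s ∧ v ∉ s then wt else 0))
          = (xs.sublists').map (fun _ => -wt) := by
        apply List.map_congr_left
        intro s hs
        have h1' : u ∉ s := fun h => hx (hux ▸ (List.mem_sublists'.mp hs).subset h)
        have h2' : v ∉ s := fun h => hx (hvx ▸ (List.mem_sublists'.mp hs).subset h)
        simp [h1', h2']
      have h2 : (xs.sublists').map ((fun s => (if u ∈ s ∧ v ∈ s then wt else 0) - (if u ∉ s ∧ v ∉ s then wt else 0)) ∘ (x :: ·))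
          = (xs.sublists').map (fun _ => wt) := by
        apply List.map_congr_left
        intro s _
        simp [List.mem_cons, hux, hvx]
      rw [h1, h2]
      simp [List.map_const', List.sum_replicate]
    · -- u = x, v ∈ xs
      have hvxs : v ∈ xs := (List.mem_cons.mp hv).resolve_left hvx
      have h1 : (xs.sublists').map (fun s => (if u ∈ s ∧ v ∈ s then wt else 0) - (if u ∉ s ∧ v ∉ s then wt else 0))
          = (xs.sublists').map (fun s => 0 - (if v ∉ s then wt else 0)) := by
        apply List.map_congr_left
        intro s hs
        have hus : u ∉ s := fun h => hx (hux ▸ (List.mem_sublists'.mp hs).subset h)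
        simp [hus]
      have h2 : (xs.sublists').map ((fun s => (if u ∈ s ∧ v ∈ s then wt else 0) - (if u ∉ s ∧ v ∉ s then wt else 0)) ∘ (x :: ·))
          = (xs.sublists').map (fun s => (if v ∈ s then wt else 0) - 0) := by
        apply List.map_congr_left
        intro s _
        simp [List.mem_cons, hux, hvx]
      rw [h1, h2, sum_map_add]
      calc ((xs.sublists').map (fun s => (0 - if v ∉ s then wt else 0) + ((if v ∈ s then wt else 0) - 0))).sum
          = ((xs.sublists').map (fun s => (if v ∈ s then wt else 0) - (if v ∉ s then wt else 0))).sum := by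
            apply congrArg; apply List.map_congr_left; intro s _; ring
        _ = 0 := count_one v wt xs hvxs hxs
    · -- v = x, u ∈ xs (symmetric)
      have huxs : u ∈ xs := (List.mem_cons.mp hu).resolve_left hux
      have h1 : (xs.sublists').map (fun s => (if u ∈ s ∧ v ∈ s then wt else 0) - (if u ∉ s ∧ v ∉ s then wt else 0))
          = (xs.sublists').map (fun s => 0 - (if u ∉ s then wt else 0)) := by
        apply List.map_congr_left
        intro s hs
        have hvs : v ∉ s := fun h => hx (hvx ▸ (List.mem_sublists'.mp hs).subset h)
        simp [hvs]
      have h2 : (xs.sublists').map ((fun s => (if u ∈ s ∧ v ∈ s then wt else 0) - (if u ∉ s ∧ v ∉ s then wt else 0)) ∘ (x :: ·))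
          = (xs.sublists').map (fun s => (if u ∈ s then wt else 0) - 0) := by
        apply List.map_congr_left
        intro s _
        simp [List.mem_cons, hux, hvx]
      rw [h1, h2, sum_map_add]
      calc ((xs.sublists').map (fun s => (0 - if u ∉ s then wt else 0) + ((if u ∈ s then wt else 0) - 0))).sum
          = ((xs.sublists').map (fun s => (if u ∈ s then wt else 0) - (if u ∉ s then wt else 0))).sum := by
            apply congrArg; apply List.map_congr_left; intro s _; ring
        _ = 0 := count_one u wt xs huxs hxs
    · -- neither endpoint is the head: the head doubles every term
      have huxs : u ∈ xs := (List.mem_cons.mp hu).resolve_left hux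
      have hvxs : v ∈ xs := (List.mem_cons.mp hv).resolve_left hvx
      have h2 : (xs.sublists').map ((fun s => (if u ∈ s ∧ v ∈ s then wt else 0) - (if u ∉ s ∧ v ∉ s then wt else 0)) ∘ (x :: ·))
          = (xs.sublists').map (fun s => (if u ∈ s ∧ v ∈ s then wt else 0) - (if u ∉ s ∧ v ∉ s then wt else 0)) := by
        apply List.map_congr_left
        intro s _
        simp [List.mem_cons, hux, hvx]
      rw [h2, ih huxs hvxs hxs]
      simp

theorem edgeSum_eq (l : List ((Int × Int) × Int)) : edgeSum l = (l.map Prod.snd).sum := by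
  unfold edgeSum
  rw [foldl_add_eq_sum Prod.snd l 0]
  simp

theorem flatMap_perm_of_perm {α β : Type} (l : List α) (f g : α → List β)
    (h : ∀ i ∈ l, (f i).Perm (g i)) : (l.flatMap f).Perm (l.flatMap g) := by
  induction l with
  | nil => simp
  | cons x xs ih =>
    simp only [List.flatMap_cons]
    exact (h x (List.mem_cons_self)).append (ih (fun i hi => h i (List.mem_cons_of_mem x hi)))

theorem set_equal_empty_iff {α : Type} [BEq α] [LawfulBEq α] (s : PySem.Set α) :
    (PySem.Set.equal s PySem.Set.empty = true) ↔ s = [] := by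
  rw [PySem.Set.equal_iff]
  constructor
  · intro h
    apply List.eq_nil_iff_forall_not_mem.mpr
    intro x hx
    have := (h x).mp hx
    simp [PySem.Set.empty] at this
  · intro h
    subst h
    intro x
    exact Iff.rfl

-- the per-subset body equals S plus the signed per-edge contributions
theorem combBody_eq (dl : List ((Int × Int) × Int)) (hd : dl.Nodup) (S : Int) (comb : List Int) :
    combBody dl S comb = S + (dl.map (fun e => gterm e comb)).sum := by
  set pb : ((Int × Int) × Int) → Bool := fun e => decide (e.1.1 ∈ comb) && decide (e.1.2 ∈ comb) with hpb
  set pn : ((Int × Int) × Int) → Bool := fun e => !(decide (e.1.1 ∈ comb) || decide (e.1.2 ∈ comb)) with hpn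
  have hA : PySem.Set.ofList (dl.filter pb) = dl.filter pb :=
    PySem.Set.ofList_eq_self_of_nodup _ (hd.filter _)
  have hBnd : ((PySem.Set.diff dl (dl.filter pb)).filter pn).Nodup :=
    (PySem.Set.nodup_diff _ _ hd).filter _
  have hB : PySem.Set.ofList ((PySem.Set.diff dl (dl.filter pb)).filter pn)
      = (PySem.Set.diff dl (dl.filter pb)).filter pn :=
    PySem.Set.ofList_eq_self_of_nodup _ hBnd
  have hBperm : ((PySem.Set.diff dl (dl.filter pb)).filter pn).Perm (dl.filter pn) := by
    rw [List.perm_ext_iff_of_nodup hBnd (hd.filter _)]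
    intro x
    simp only [List.mem_filter, PySem.Set.mem_diff]
    constructor
    · rintro ⟨⟨hx, -⟩, hpnx⟩
      exact ⟨hx, hpnx⟩
    · rintro ⟨hx, hpnx⟩
      refine ⟨⟨hx, ?_⟩, hpnx⟩
      rintro ⟨-, hpbx⟩
      simp only [hpb, hpn, Bool.and_eq_true, Bool.not_eq_true', Bool.or_eq_false_iff,
        decide_eq_true_eq, decide_eq_false_iff_not] at hpbx hpnx
      exact hpnx.1 hpbx.1
  have hBsum : (((PySem.Set.diff dl (dl.filter pb)).filter pn).map Prod.snd).sum
      = ((dl.filter pn).map Prod.snd).sum := (hBperm.map Prod.snd).sum_eq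
  have hBnil : (PySem.Set.diff dl (dl.filter pb)).filter pn = [] → dl.filter pn = [] :=
    fun h => (h ▸ hBperm).symm.eq_nil
  have hsum : ((dl.filter pb).map Prod.snd).sum - ((dl.filter pn).map Prod.snd).sum
      = (dl.map (fun e => gterm e comb)).sum := by
    rw [sum_filter_eq_sum_ite, sum_filter_eq_sum_ite, sum_map_sub]
    apply congrArg
    apply List.map_congr_left
    intro e _
    by_cases h1 : e.1.1 ∈ comb <;> by_cases h2 : e.1.2 ∈ comb <;>
      simp [hpb, hpn, gterm, h1, h2]
  simp only [combBody, ← hpb, ← hpn, hA, hB]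
  rw [edgeSum_eq, edgeSum_eq, ← hsum]
  simp only [hBsum]
  split_ifs with h1 h2 h3
  · rw [Bool.and_eq_true, set_equal_empty_iff, set_equal_empty_iff] at h1
    rw [h1.1, hBnil h1.2]
    simp
  · rw [set_equal_empty_iff] at h2
    rw [h2]
    simp
    ring
  · rw [set_equal_empty_iff] at h3
    rw [hBnil h3]
    simp
  · ring

-- each edge with both endpoints listed nets exactly its weight over all nonempty subsets
theorem per_edge (e : (Int × Int) × Int) (msl : List Int) (hm : msl.Nodup)
    (h1 : e.1.1 ∈ msl) (h2 : e.1.2 ∈ msl) :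
    (((List.range msl.length).flatMap (fun i => combos (i + 1) msl)).map (gterm e)).sum = e.2 := by
  have hcongr : ((List.range (msl.length + 1)).flatMap (fun i => combos i msl)).Perm msl.sublists' :=
    (flatMap_perm_of_perm _ _ _ (fun i _ => combos_perm i msl)).trans
      (List.range_bind_sublistsLen_perm msl)
  have hall : (((List.range (msl.length + 1)).flatMap (fun i => combos i msl)).map (gterm e)).sum = 0 := by
    rw [(hcongr.map (gterm e)).sum_eq]
    simpa [gterm] using count_two e.1.1 e.1.2 e.2 msl h1 h2 hm
  rw [List.range_succ_eq_map, List.flatMap_cons, List.map_append, List.sum_append] at hall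
  have hzero : ((combos 0 msl).map (gterm e)).sum = -e.2 := by
    simp [combos, gterm]
  have hmapmap : ((List.map Nat.succ (List.range msl.length)).flatMap fun i => combos i msl)
      = (List.range msl.length).flatMap (fun i => combos (i + 1) msl) := by
    rw [List.flatMap_map]
  rw [hzero, hmapmap] at hall
  omega

-- ===== VERDICT (by name: the statement is the Claim_ definition above) =====
theorem solve_spec : Claim_equal_solve := by
  unfold Claim_equal_solve
  intro n a b c _
  unfold Spec_solve
  simp only [solve, solve_alt]
  set dl : PySem.Set ((Int × Int) × Int) := PySem.Set.ofList ((a.zip b).zip c) with hdl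
  set msl : PySem.Set Int := PySem.Set.ofList (a ++ b) with hmsl
  have hd : List.Nodup dl := PySem.Set.nodup_ofList _
  have hm : List.Nodup msl := PySem.Set.nodup_ofList _
  have hend : ∀ e ∈ dl, e.1.1 ∈ msl ∧ e.1.2 ∈ msl := by
    intro e he
    have he' : e ∈ (a.zip b).zip c := (PySem.Set.mem_ofList _ _).mp he
    have h1 : e.1 ∈ a.zip b := (List.of_mem_zip he').1
    have h2 := List.of_mem_zip h1
    constructor
    · exact (PySem.Set.mem_ofList _ _).mpr (List.mem_append_left _ h2.1)
    · exact (PySem.Set.mem_ofList _ _).mpr (List.mem_append_right _ h2.2)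
  have hbody : combBody dl = fun S comb => S + (dl.map (fun e => gterm e comb)).sum :=
    funext fun S => funext fun comb => combBody_eq dl hd S comb
  rw [hbody, foldl_append_eq_flatMap', List.nil_append,
    foldl_add_eq_sum (fun comb => (dl.map (fun e => gterm e comb)).sum) _ 0, zero_add,
    sum_comm _ dl (fun comb e => gterm e comb),
    foldl_add_eq_sum Prod.snd dl 0, zero_add]
  apply congrArg (fun z => PySem.Int.mod z 1000000007)
  apply congrArg
  apply List.map_congr_left
  intro e he
  exact per_edge e msl hm (hend e he).1 (hend e he).2
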